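-- pv_equiv track=rewrite | github.com/sudheerj/datastructures-algorithms | src/python/algorithms/strings/13.minSubstringsWithoutRepeatingChar/min_substrings_without_repeating_char.py | min_substrings_without_repeating_char
-- ===== SOURCE A (Python) =====
-- def min_substrings_without_repeating_char(s):
--     """
--     Greedy approach using a set.
--     TC: O(n), SC: O(k)
--     """
--     seen = set()
--     count_substrings = 0
--
--     for char in s:
--         if char in seen:
--             count_substrings += 1
--             seen.clear()
--         seen.add(char)
--
--     return count_substrings + 1 if seen else count_substrings
-- ===== SOURCE B (Python) =====
-- def min_substrings_without_repeating_char(s):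
--     """Chunk-at-a-time: repeatedly cut off the LONGEST duplicate-free prefix of the
--     remaining suffix s[start:] and count the chunks. Since every prefix of a
--     duplicate-free string is duplicate-free, 'prefix of length k is duplicate-free'
--     is a monotone property of k, so the longest such prefix is found by EXPONENTIAL
--     SEARCH (double an upper bound while the test passes) followed by BINARY SEARCH,
--     testing a candidate length with one whole-prefix set-cardinality check."""
--     count = 0
--     start = 0
--     N = len(s)
--     while start < N:
--         n = N - start
--         hi = 1
--         while hi < n and len(set(s[start:start + min(2 * hi, n)])) == min(2 * hi, n):
--             hi = min(2 * hi, n)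
--         if hi == n:
--             k = n
--         else:
--             lo, hi2 = hi, min(2 * hi, n) - 1
--             while lo < hi2:
--                 mid = (lo + hi2 + 1) // 2
--                 if len(set(s[start:start + mid])) == mid:
--                     lo = mid
--                 else:
--                     hi2 = mid - 1
--             k = lo
--         count += 1
--         start += k
--     return count
-- ===== Notes on version B (the rewrite author's own statement) =====
-- stated objective: alternative
-- what changed: Replaces A's single incremental pass (seen-set cleared at every repeat) by a chunk-at-a-time decomposition: since prefix-distinctness is monotone in the length, the longest duplicate-free prefix of the remaining suffix is found by exponential search followed by binary search on its length, each candidate tested with one whole-prefix set-cardinality check; the chunk is skipped by advancing a start index and counted, with no per-character running state at all.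
import Mathlib
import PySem

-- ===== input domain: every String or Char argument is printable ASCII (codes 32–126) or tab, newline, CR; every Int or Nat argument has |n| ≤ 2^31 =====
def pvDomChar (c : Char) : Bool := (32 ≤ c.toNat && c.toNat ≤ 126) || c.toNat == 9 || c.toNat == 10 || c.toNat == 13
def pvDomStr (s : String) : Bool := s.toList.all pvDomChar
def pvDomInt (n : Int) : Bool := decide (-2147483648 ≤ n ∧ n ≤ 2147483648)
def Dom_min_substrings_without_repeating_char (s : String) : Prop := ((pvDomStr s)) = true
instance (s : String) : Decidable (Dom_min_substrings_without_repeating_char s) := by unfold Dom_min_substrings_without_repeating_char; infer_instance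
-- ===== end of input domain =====

-- B replaces A's incremental pass (seen-set cleared at every cut) by a chunk-at-a-time
-- decomposition: repeatedly cut off the longest duplicate-free prefix, found by exponential
-- plus binary search on its length with whole-prefix set-cardinality tests (alternative; same result).

-- ===== PORT A =====
-- the 'for char in s' loop: state (seen, count_substrings)
def pvALoop : List Char → PySem.Set Char → Int → PySem.Set Char × Int
  | [], seen, count => (seen, count)
  | c :: rest, seen, count =>
    if PySem.Set.contains seen c then
      pvALoop rest (PySem.Set.add PySem.Set.empty c) (count + 1)
    else
      pvALoop rest (PySem.Set.add seen c) count

def min_substrings_without_repeating_char (s : String) : Int :=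
  let r := pvALoop s.toList PySem.Set.empty 0
  if r.1 = [] then r.2 else r.2 + 1

-- ===== PORT B =====
-- Throughout, the Python slice s[start:start+m] (nonnegative bounds) is exactly
-- (s.toList.drop start).take m; the helpers below receive that suffix as `rest`.
-- the inner binary search: largest k in [lo, hi] whose k-prefix of rest is duplicate-free,
-- tested by the set-cardinality check len(set(...)) == k ('//' on these nonnegative
-- operands is Nat division, exact for Python's floor division); fuel = hi - lo suffices
-- since each step strictly shrinks the interval (the fuel is a totality device only)
def pvBisectF (rest : List Char) : Nat → Nat → Nat → Nat
  | 0, lo, _ => lo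
  | fuel + 1, lo, hi =>
    if lo < hi then
      if (PySem.Set.ofList (rest.take ((lo + hi + 1) / 2))).length = (lo + hi + 1) / 2 then
        pvBisectF rest fuel ((lo + hi + 1) / 2) hi
      else
        pvBisectF rest fuel lo ((lo + hi + 1) / 2 - 1)
    else lo

def pvBisect (rest : List Char) (lo hi : Nat) : Nat :=
  pvBisectF rest (hi - lo) lo hi

-- the exponential search: double hi while the (min (2*hi) n)-prefix is duplicate-free;
-- fuel = n suffices since hi strictly grows (again a totality device only)
def pvGallopF (rest : List Char) : Nat → Nat → Nat
  | 0, hi => hi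
  | fuel + 1, hi =>
    if hi < rest.length then
      if (PySem.Set.ofList (rest.take (min (2 * hi) rest.length))).length
          = min (2 * hi) rest.length then
        pvGallopF rest fuel (min (2 * hi) rest.length)
      else hi
    else hi

-- the chunk length the two inner loops compute for the suffix `rest`
def pvChunk (rest : List Char) : Nat :=
  if pvGallopF rest rest.length 1 = rest.length then rest.length
  else
    pvBisect rest (pvGallopF rest rest.length 1)
      (min (2 * pvGallopF rest rest.length 1) rest.length - 1)

-- termination facts the outer loop's port cites: neither search goes below its start,
-- so a chunk on a nonempty suffix has length ≥ 1
lemma pvBisectF_ge (rest : List Char) : ∀ (fuel lo hi : Nat), lo ≤ pvBisectF rest fuel lo hi := by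
  intro fuel
  induction fuel with
  | zero => intro lo hi; rw [pvBisectF]
  | succ m ih =>
    intro lo hi
    rw [pvBisectF]
    split
    · split
      · have := ih ((lo + hi + 1) / 2) hi
        omega
      · exact ih lo ((lo + hi + 1) / 2 - 1)
    · exact le_refl lo

lemma pvGallopF_ge (rest : List Char) : ∀ (fuel hi : Nat), hi ≤ pvGallopF rest fuel hi := by
  intro fuel
  induction fuel with
  | zero => intro hi; rw [pvGallopF]
  | succ m ih =>
    intro hi
    rw [pvGallopF]
    split
    · split
      · rename_i hlt _
        have h1 : hi ≤ min (2 * hi) rest.length := by omega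
        exact le_trans h1 (ih (min (2 * hi) rest.length))
      · exact le_refl hi
    · exact le_refl hi

lemma pvChunk_pos (rest : List Char) (h : rest ≠ []) : 1 ≤ pvChunk rest := by
  have hlen : 1 ≤ rest.length := by cases rest <;> simp_all
  unfold pvChunk
  split
  · exact hlen
  · have h1 := pvGallopF_ge rest rest.length 1
    have h2 := pvBisectF_ge rest
      (min (2 * pvGallopF rest rest.length 1) rest.length - 1 - pvGallopF rest rest.length 1)
      (pvGallopF rest rest.length 1)
      (min (2 * pvGallopF rest rest.length 1) rest.length - 1)
    unfold pvBisect
    omega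

-- the outer 'while start < N:' loop: state (start, count)
def pvBOuter (cs : List Char) (start : Nat) (count : Int) : Int :=
  if start < cs.length then
    pvBOuter cs (start + pvChunk (cs.drop start)) (count + 1)
  else count
termination_by cs.length - start
decreasing_by
  have hne : cs.drop start ≠ [] := by
    intro hnil
    have := congrArg List.length hnil
    simp only [List.length_drop, List.length_nil] at this
    omega
  have := pvChunk_pos (cs.drop start) hne
  omega

def min_substrings_without_repeating_char_alt (s : String) : Int :=
  pvBOuter s.toList 0 0

-- ===== PRECONDITION & SPEC =====
def Spec_min_substrings_without_repeating_char (s : String) (out : Int) : Prop := out = min_substrings_without_repeating_char_alt s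
instance (s : String) (out : Int) : Decidable (Spec_min_substrings_without_repeating_char s out) := by unfold Spec_min_substrings_without_repeating_char; infer_instance

-- ===== CLAIM (what is proved, stated in full; the proofs are below) =====
def Claim_equal_min_substrings_without_repeating_char : Prop := ∀ (s : String), Dom_min_substrings_without_repeating_char s → Spec_min_substrings_without_repeating_char s (min_substrings_without_repeating_char s)

-- ===== LEMMAS AND PROOFS =====

-- proof-only measure: length of the duplicate-free run A consumes from state `seen`
def pvTd : List Char → PySem.Set Char → Nat
  | [], _ => 0
  | c :: rest, seen =>
    if PySem.Set.contains seen c then 0 else 1 + pvTd rest (PySem.Set.add seen c)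

lemma pvTd_le (cs : List Char) : ∀ seen, pvTd cs seen ≤ cs.length := by
  induction cs with
  | nil => intro seen; simp [pvTd]
  | cons c rest ih =>
    intro seen
    rw [pvTd]
    split
    · simp
    · have := ih (PySem.Set.add seen c); simp; omega

lemma pvTd_pos (c : Char) (rest : List Char) : 1 ≤ pvTd (c :: rest) PySem.Set.empty := by
  rw [pvTd]
  simp [PySem.Set.contains, PySem.Set.empty]

-- length of a fold of Set.add grows by at most the number of added elements
lemma foldl_add_len_le (l : List Char) : ∀ acc : PySem.Set Char,
    (l.foldl PySem.Set.add acc).length ≤ acc.length + l.length := by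
  induction l with
  | nil => intro acc; simp
  | cons c rest ih =>
    intro acc
    have h := ih (PySem.Set.add acc c)
    have : (PySem.Set.add acc c).length ≤ acc.length + 1 := by
      unfold PySem.Set.add; split <;> simp
    simp only [List.foldl_cons, List.length_cons]
    omega

-- within the duplicate-free run every add is fresh: the fold grows by exactly k
lemma foldl_add_len_run (cs : List Char) : ∀ (seen : PySem.Set Char) (k : Nat),
    k ≤ pvTd cs seen →
    ((cs.take k).foldl PySem.Set.add seen).length = seen.length + k := by
  induction cs with
  | nil =>
    intro seen k hk
    simp [pvTd] at hk
    simp [hk]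
  | cons c rest ih =>
    intro seen k hk
    rw [pvTd] at hk
    by_cases hc : PySem.Set.contains seen c
    · rw [if_pos hc] at hk
      simp [Nat.le_zero.mp hk]
    · rw [if_neg hc] at hk
      match k with
      | 0 => simp
      | k' + 1 =>
        have hk' : k' ≤ pvTd rest (PySem.Set.add seen c) := by omega
        have hadd : (PySem.Set.add seen c).length = seen.length + 1 := by
          unfold PySem.Set.add
          rw [if_neg hc]
          simp
        simp only [List.take_succ_cons, List.foldl_cons]
        rw [ih (PySem.Set.add seen c) k' hk', hadd]
        omega

-- past the run a duplicate has been folded in: the fold stays strictly below k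
lemma foldl_add_len_dup (cs : List Char) : ∀ (seen : PySem.Set Char) (k : Nat),
    pvTd cs seen < k → k ≤ cs.length →
    ((cs.take k).foldl PySem.Set.add seen).length < seen.length + k := by
  induction cs with
  | nil => intro seen k h1 h2; simp at h2; omega
  | cons c rest ih =>
    intro seen k h1 h2
    rw [pvTd] at h1
    match k with
    | 0 => omega
    | k' + 1 =>
      simp only [List.take_succ_cons, List.foldl_cons]
      by_cases hc : PySem.Set.contains seen c
      · have hadd : PySem.Set.add seen c = seen := by unfold PySem.Set.add; rw [if_pos hc]
        rw [hadd]
        have hle := foldl_add_len_le (rest.take k') seen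
        simp only [List.length_take] at hle
        omega
      · rw [if_neg hc] at h1
        have hadd : (PySem.Set.add seen c).length = seen.length + 1 := by
          unfold PySem.Set.add
          rw [if_neg hc]
          simp
        have := ih (PySem.Set.add seen c) k' (by omega) (by simpa using h2)
        omega

-- the prefix-distinctness test is monotone: it holds exactly up to the run length
lemma pvCond_iff (cs : List Char) (k : Nat) (hk : k ≤ cs.length) :
    (PySem.Set.ofList (cs.take k)).length = k ↔ k ≤ pvTd cs PySem.Set.empty := by
  have hof : PySem.Set.ofList (cs.take k) = (cs.take k).foldl PySem.Set.add PySem.Set.empty := rfl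
  constructor
  · intro h
    by_contra hgt
    have := foldl_add_len_dup cs PySem.Set.empty k (by omega) hk
    rw [hof] at h
    simp only [PySem.Set.empty, List.length_nil] at this h
    omega
  · intro h
    rw [hof, foldl_add_len_run cs PySem.Set.empty k h]
    simp [PySem.Set.empty]

-- the binary search finds exactly the run length pvTd cs ∅
lemma pvBisectF_eq_td (cs : List Char) : ∀ (fuel lo hi : Nat), hi - lo ≤ fuel →
    lo ≤ pvTd cs PySem.Set.empty → pvTd cs PySem.Set.empty ≤ hi → hi ≤ cs.length →
    pvBisectF cs fuel lo hi = pvTd cs PySem.Set.empty := by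
  intro fuel
  induction fuel with
  | zero =>
    intro lo hi h h1 h2 h3
    rw [pvBisectF]
    omega
  | succ m ih =>
    intro lo hi h h1 h2 h3
    rw [pvBisectF]
    by_cases hlh : lo < hi
    · rw [if_pos hlh]
      by_cases hc : (PySem.Set.ofList (cs.take ((lo + hi + 1) / 2))).length = (lo + hi + 1) / 2
      · rw [if_pos hc]
        have hle := (pvCond_iff cs ((lo + hi + 1) / 2) (by omega)).mp hc
        exact ih ((lo + hi + 1) / 2) hi (by omega) hle h2 h3
      · rw [if_neg hc]
        have hgt : ¬ ((lo + hi + 1) / 2 ≤ pvTd cs PySem.Set.empty) := fun hle =>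
          hc ((pvCond_iff cs ((lo + hi + 1) / 2) (by omega)).mpr hle)
        exact ih lo ((lo + hi + 1) / 2 - 1) (by omega) h1 (by omega) (by omega)
    · rw [if_neg hlh]
      omega

lemma pvBisect_eq_td (cs : List Char) (lo hi : Nat)
    (h1 : lo ≤ pvTd cs PySem.Set.empty) (h2 : pvTd cs PySem.Set.empty ≤ hi)
    (h3 : hi ≤ cs.length) : pvBisect cs lo hi = pvTd cs PySem.Set.empty :=
  pvBisectF_eq_td cs (hi - lo) lo hi (le_refl _) h1 h2 h3

-- A consumes the whole run without a cut
lemma pvALoop_nocut (cs : List Char) : ∀ (seen : PySem.Set Char) (count : Int),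
    pvTd cs seen = cs.length → (pvALoop cs seen count).2 = count := by
  induction cs with
  | nil => intro seen count _; simp [pvALoop]
  | cons c rest ih =>
    intro seen count h
    rw [pvTd] at h
    by_cases hc : PySem.Set.contains seen c
    · rw [if_pos hc] at h
      exact absurd h (by simp)
    · rw [if_neg hc] at h
      simp only [List.length_cons] at h
      rw [pvALoop, if_neg hc]
      exact ih _ _ (by omega)

-- at the first duplicate A cuts: its state equals a fresh start on the rest of the string
lemma pvALoop_cut (cs : List Char) : ∀ (seen : PySem.Set Char) (count : Int),
    pvTd cs seen < cs.length →
    pvALoop cs seen count = pvALoop (cs.drop (pvTd cs seen)) PySem.Set.empty (count + 1) := by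
  induction cs with
  | nil => intro seen count h; simp at h
  | cons c rest ih =>
    intro seen count h
    rw [pvTd] at h ⊢
    by_cases hc : PySem.Set.contains seen c
    · rw [if_pos hc]
      simp only [List.drop_zero]
      rw [pvALoop, if_pos hc, pvALoop,
        if_neg (by simp [PySem.Set.contains, PySem.Set.empty])]
    · rw [if_neg hc]
      rw [if_neg hc] at h
      simp only [List.length_cons, Nat.add_comm 1] at h
      have h' := Nat.lt_of_add_lt_add_right h
      rw [pvALoop, if_neg hc, ih _ _ h', Nat.add_comm 1, List.drop_succ_cons]

-- A's seen-set is never empty again once something entered it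
lemma pvSet_add_ne_nil (s : PySem.Set Char) (x : Char) : PySem.Set.add s x ≠ [] := by
  unfold PySem.Set.add
  split
  · rename_i h
    intro hnil
    subst hnil
    simp [PySem.Set.contains] at h
  · simp

lemma pvALoop_fst_ne (cs : List Char) : ∀ (seen : PySem.Set Char) (count : Int),
    seen ≠ [] → (pvALoop cs seen count).1 ≠ [] := by
  induction cs with
  | nil => intro seen count h; simpa [pvALoop] using h
  | cons c rest ih =>
    intro seen count h
    rw [pvALoop]
    split
    · exact ih _ _ (pvSet_add_ne_nil _ c)
    · exact ih _ _ (pvSet_add_ne_nil _ c)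

-- the exponential search yields a bracket [hi, min (2*hi) n) around the run length
-- (or certifies that the whole suffix is duplicate-free)
lemma pvGallop_spec (rest : List Char) : ∀ (fuel hi : Nat), 1 ≤ hi →
    hi ≤ pvTd rest PySem.Set.empty → rest.length - hi ≤ fuel →
    (pvGallopF rest fuel hi = rest.length ∧ pvTd rest PySem.Set.empty = rest.length) ∨
    (pvGallopF rest fuel hi ≤ pvTd rest PySem.Set.empty ∧
      pvTd rest PySem.Set.empty < min (2 * pvGallopF rest fuel hi) rest.length) := by
  intro fuel
  have htdle := pvTd_le rest PySem.Set.empty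
  induction fuel with
  | zero =>
    intro hi h1 h2 h3
    rw [pvGallopF]
    left
    omega
  | succ m ih =>
    intro hi h1 h2 h3
    rw [pvGallopF]
    by_cases hlt : hi < rest.length
    · rw [if_pos hlt]
      by_cases hc : (PySem.Set.ofList (rest.take (min (2 * hi) rest.length))).length
          = min (2 * hi) rest.length
      · rw [if_pos hc]
        have hle := (pvCond_iff rest (min (2 * hi) rest.length) (by omega)).mp hc
        exact ih (min (2 * hi) rest.length) (by omega) hle (by omega)
      · rw [if_neg hc]
        right
        refine ⟨h2, ?_⟩
        by_contra hge
        exact hc ((pvCond_iff rest (min (2 * hi) rest.length) (by omega)).mpr (by omega))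
    · rw [if_neg hlt]
      left
      omega

-- the two inner loops together compute exactly the run length pvTd rest ∅
lemma pvChunk_eq_td (c : Char) (rs : List Char) :
    pvChunk (c :: rs) = pvTd (c :: rs) PySem.Set.empty := by
  have htd_pos := pvTd_pos c rs
  have htd_le := pvTd_le (c :: rs) PySem.Set.empty
  have hspec := pvGallop_spec (c :: rs) (c :: rs).length 1 (le_refl 1) htd_pos (by omega)
  unfold pvChunk
  rcases hspec with ⟨hg, htd⟩ | ⟨hg1, hg2⟩
  · rw [if_pos hg, htd]
  · have hne : pvGallopF (c :: rs) (c :: rs).length 1 ≠ (c :: rs).length := by omega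
    rw [if_neg hne]
    exact pvBisect_eq_td (c :: rs) _ _ hg1 (by omega) (by omega)

-- main induction: on a nonempty suffix s[start:], A's count + 1 equals B's chunk count
lemma pvMain (cs : List Char) : ∀ (n start : Nat) (count : Int), cs.length - start ≤ n →
    start < cs.length →
    (pvALoop (cs.drop start) PySem.Set.empty count).2 + 1 = pvBOuter cs start count := by
  intro n
  induction n with
  | zero => intro start count h1 h2; omega
  | succ m ih =>
    intro start count h1 h2
    have hne : cs.drop start ≠ [] := by
      intro hnil
      have := congrArg List.length hnil
      simp only [List.length_drop, List.length_nil] at this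
      omega
    obtain ⟨c, rs, hcr⟩ := List.exists_cons_of_ne_nil hne
    have hk : pvChunk (cs.drop start) = pvTd (cs.drop start) PySem.Set.empty := by
      rw [hcr]; exact pvChunk_eq_td c rs
    have htd_le : pvTd (cs.drop start) PySem.Set.empty ≤ (cs.drop start).length :=
      pvTd_le _ _
    have htd_pos : 1 ≤ pvTd (cs.drop start) PySem.Set.empty := by
      rw [hcr]; exact pvTd_pos c rs
    have hdlen : (cs.drop start).length = cs.length - start := by
      simp [List.length_drop]
    rw [pvBOuter, if_pos h2, hk]
    by_cases hcase : pvTd (cs.drop start) PySem.Set.empty = (cs.drop start).length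
    · rw [pvALoop_nocut (cs.drop start) PySem.Set.empty count hcase]
      rw [pvBOuter, if_neg (by omega)]
    · have hlt : pvTd (cs.drop start) PySem.Set.empty < (cs.drop start).length :=
        lt_of_le_of_ne htd_le hcase
      rw [pvALoop_cut (cs.drop start) PySem.Set.empty count hlt]
      rw [List.drop_drop]
      exact ih (start + pvTd (cs.drop start) PySem.Set.empty) (count + 1)
        (by omega) (by omega)

-- ===== VERDICT (by name: the statement is the Claim_ definition above) =====
theorem min_substrings_without_repeating_char_spec : Claim_equal_min_substrings_without_repeating_char := by
  intro s _
  unfold Spec_min_substrings_without_repeating_char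
  unfold min_substrings_without_repeating_char min_substrings_without_repeating_char_alt
  by_cases h : s.toList = []
  · rw [h]
    rw [pvBOuter]
    simp [pvALoop, PySem.Set.empty]
  · obtain ⟨c, rest, hcr⟩ := List.exists_cons_of_ne_nil h
    have hne : (pvALoop (c :: rest) PySem.Set.empty 0).1 ≠ [] := by
      rw [pvALoop, if_neg (by simp [PySem.Set.contains, PySem.Set.empty])]
      exact pvALoop_fst_ne rest _ 0 (pvSet_add_ne_nil PySem.Set.empty c)
    rw [hcr]
    simp only [if_neg hne]
    have := pvMain (c :: rest) (c :: rest).length 0 0 (by omega) (by simp)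
    simpa using this
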